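-- pv_equiv track=rewrite | github.com/mjbaucas/UrbanSoundClassifier | dataprocess.py | organize_power_list
-- ===== SOURCE A (Python) =====
-- def organize_power_list(power_list, override):
--     power_record_list = []
--     power_extract_list = []
--     power_classifier_list = []
--     switch = 0
--     for power_value in power_list:
--         if switch == 0:
--             power_record_list.append(power_value[2])
--             if override == 1:
--                 switch = 2
--             else:
--                 switch = 1
--         elif switch == 1:
--             power_extract_list.append(power_value[2])
--             switch = 2
--         else:
--             power_classifier_list.append(power_value[2])
--             switch = 0
--
--     return power_record_list, power_extract_list, power_classifier_list
-- ===== SOURCE B (Python) =====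
-- def organize_power_list(power_list, override):
--     # Branch once on override and pick elements by strided slices instead of a switch state machine.
--     if override == 1:
--         return ([p[2] for p in power_list[0::2]],
--                 [],
--                 [p[2] for p in power_list[1::2]])
--     return ([p[2] for p in power_list[0::3]],
--             [p[2] for p in power_list[1::3]],
--             [p[2] for p in power_list[2::3]])
-- ===== Notes on version B (the rewrite author's own statement) =====
-- stated objective: simpler
-- what changed: Replaces the mutable switch-state loop with a single branch on override and strided slice selection (power_list[0::3]/[1::3]/[2::3], or [0::2]/[1::2] when override==1).
import Mathlib
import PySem

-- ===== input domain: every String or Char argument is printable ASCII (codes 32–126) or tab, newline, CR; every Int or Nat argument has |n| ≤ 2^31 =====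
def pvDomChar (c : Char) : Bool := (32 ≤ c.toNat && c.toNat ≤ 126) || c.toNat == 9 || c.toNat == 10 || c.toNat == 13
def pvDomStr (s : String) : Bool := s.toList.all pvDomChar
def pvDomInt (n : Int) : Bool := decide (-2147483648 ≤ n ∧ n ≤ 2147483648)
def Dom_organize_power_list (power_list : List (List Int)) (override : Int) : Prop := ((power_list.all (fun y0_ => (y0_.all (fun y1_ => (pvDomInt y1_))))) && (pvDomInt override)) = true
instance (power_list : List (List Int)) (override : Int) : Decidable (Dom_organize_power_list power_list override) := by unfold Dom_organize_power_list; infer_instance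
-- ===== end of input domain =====

-- B replaces A's mutable switch-state loop with one branch on override and strided positional selection (simpler decomposition; same O(n) cost).

-- ===== PORT A =====
-- literal port of A's loop: state (record, extract, classifier, switch); power_value[2] is
-- PySem.List.pyGetD _ 2 0 — Pre_ excludes the rows of length < 3 where Python raises IndexError
def organize_power_list (power_list : List (List Int)) (override : Int) : List Int × List Int × List Int :=
  let s := power_list.foldl
    (fun (st : List Int × List Int × List Int × Int) power_value =>
      let (rec_, ext, cls, sw) := st
      if sw = 0 then
        (rec_ ++ [PySem.List.pyGetD power_value 2 0], ext, cls, if override = 1 then 2 else 1)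
      else if sw = 1 then
        (rec_, ext ++ [PySem.List.pyGetD power_value 2 0], cls, 2)
      else
        (rec_, ext, cls ++ [PySem.List.pyGetD power_value 2 0], 0))
    ([], [], [], 0)
  (s.1, s.2.1, s.2.2.1)

-- ===== PORT B =====
-- hand port of the step slices Source B uses (xs[s::2], xs[s::3], s ≥ 0): drop s, then keep every 2nd / 3rd
def pvEvery2 : List (List Int) → List (List Int)
  | [] => []
  | x :: [] => [x]
  | x :: _ :: r => x :: pvEvery2 r

def pvEvery3 : List (List Int) → List (List Int)
  | [] => []
  | x :: [] => [x]
  | x :: _ :: [] => [x]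
  | x :: _ :: _ :: r => x :: pvEvery3 r

def organize_power_list_alt (power_list : List (List Int)) (override : Int) : List Int × List Int × List Int :=
  let f := fun (p : List Int) => PySem.List.pyGetD p 2 0   -- p[2]; exact on Pre_ (rows of length ≥ 3)
  if override = 1 then
    ((pvEvery2 power_list).map f, [], (pvEvery2 (power_list.drop 1)).map (fun p => PySem.List.pyGetD p 2 0))
  else
    ((pvEvery3 power_list).map f, (pvEvery3 (power_list.drop 1)).map f, (pvEvery3 (power_list.drop 2)).map (fun p => PySem.List.pyGetD p 2 0))

-- ===== PRECONDITION & SPEC =====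
-- Pre_ excludes exactly the inputs on which Python A raises IndexError: a row shorter than 3.
def Pre_organize_power_list (power_list : List (List Int)) (override : Int) : Prop :=
  ∀ p ∈ power_list, 3 ≤ p.length
instance (power_list : List (List Int)) (override : Int) : Decidable (Pre_organize_power_list power_list override) := by unfold Pre_organize_power_list; infer_instance
def pvWitness_organize_power_list : List (List Int) × Int := ([[1, 2, 3], [4, 5, 6], [7, 8, 9]], 0)

def Spec_organize_power_list (power_list : List (List Int)) (override : Int) (out : List Int × List Int × List Int) : Prop := out = organize_power_list_alt power_list override
instance (power_list : List (List Int)) (override : Int) (out : List Int × List Int × List Int) : Decidable (Spec_organize_power_list power_list override out) := by unfold Spec_organize_power_list; infer_instance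

-- ===== CLAIM (what is proved, stated in full; the proofs are below) =====
def Claim_equal_organize_power_list : Prop := ∀ (power_list : List (List Int)) (override : Int), Dom_organize_power_list power_list override → Pre_organize_power_list power_list override → Spec_organize_power_list power_list override (organize_power_list power_list override)

-- ===== LEMMAS AND PROOFS =====

-- recursive characterization of A's loop body, carrying the final switch
def pvGo (ov : Int) (sw : Int) : List (List Int) → List Int × List Int × List Int × Int
  | [] => ([], [], [], sw)
  | p :: rest =>
    if sw = 0 then
      let g := pvGo ov (if ov = 1 then 2 else 1) rest
      (PySem.List.pyGetD p 2 0 :: g.1, g.2.1, g.2.2.1, g.2.2.2)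
    else if sw = 1 then
      let g := pvGo ov 2 rest
      (g.1, PySem.List.pyGetD p 2 0 :: g.2.1, g.2.2.1, g.2.2.2)
    else
      let g := pvGo ov 0 rest
      (g.1, g.2.1, PySem.List.pyGetD p 2 0 :: g.2.2.1, g.2.2.2)

lemma pvEvery2_cons (p : List Int) (r : List (List Int)) :
    pvEvery2 (p :: r) = p :: pvEvery2 (r.drop 1) := by cases r <;> rfl

lemma pvEvery3_cons (p : List Int) (r : List (List Int)) :
    pvEvery3 (p :: r) = p :: pvEvery3 (r.drop 2) := by
  cases r with
  | nil => rfl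
  | cons q t => cases t <;> rfl

lemma pvDrop1_cons (p : List Int) (r : List (List Int)) : (p :: r).drop 1 = r := rfl

lemma pvDrop2_cons (p : List Int) (r : List (List Int)) : (p :: r).drop 2 = r.drop 1 := rfl

lemma foldl_eq_pvGo (ov : Int) (l : List (List Int)) :
    ∀ (rec_ ext cls : List Int) (sw : Int),
    l.foldl
      (fun (st : List Int × List Int × List Int × Int) power_value =>
        let (rec_, ext, cls, sw) := st
        if sw = 0 then
          (rec_ ++ [PySem.List.pyGetD power_value 2 0], ext, cls, if ov = 1 then 2 else 1)
        else if sw = 1 then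
          (rec_, ext ++ [PySem.List.pyGetD power_value 2 0], cls, 2)
        else
          (rec_, ext, cls ++ [PySem.List.pyGetD power_value 2 0], 0))
      (rec_, ext, cls, sw)
    = (rec_ ++ (pvGo ov sw l).1, ext ++ (pvGo ov sw l).2.1, cls ++ (pvGo ov sw l).2.2.1, (pvGo ov sw l).2.2.2) := by
  induction l with
  | nil => intro rec_ ext cls sw; simp [pvGo]
  | cons p rest ih =>
    intro rec_ ext cls sw
    by_cases h0 : sw = 0
    · simp [pvGo, h0, List.foldl_cons, ih]
    · by_cases h1 : sw = 1
      · simp [pvGo, h0, h1, List.foldl_cons, ih]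
      · simp [pvGo, h0, h1, List.foldl_cons, ih]

lemma pvGo_cycle3 (ov : Int) (hov : ¬ ov = 1) (l : List (List Int)) :
    ((pvGo ov 0 l).1 = (pvEvery3 l).map (fun p => PySem.List.pyGetD p 2 0) ∧ (pvGo ov 0 l).2.1 = (pvEvery3 (l.drop 1)).map (fun p => PySem.List.pyGetD p 2 0) ∧ (pvGo ov 0 l).2.2.1 = (pvEvery3 (l.drop 2)).map (fun p => PySem.List.pyGetD p 2 0))
    ∧ ((pvGo ov 1 l).2.1 = (pvEvery3 l).map (fun p => PySem.List.pyGetD p 2 0) ∧ (pvGo ov 1 l).2.2.1 = (pvEvery3 (l.drop 1)).map (fun p => PySem.List.pyGetD p 2 0) ∧ (pvGo ov 1 l).1 = (pvEvery3 (l.drop 2)).map (fun p => PySem.List.pyGetD p 2 0))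
    ∧ ((pvGo ov 2 l).2.2.1 = (pvEvery3 l).map (fun p => PySem.List.pyGetD p 2 0) ∧ (pvGo ov 2 l).1 = (pvEvery3 (l.drop 1)).map (fun p => PySem.List.pyGetD p 2 0) ∧ (pvGo ov 2 l).2.1 = (pvEvery3 (l.drop 2)).map (fun p => PySem.List.pyGetD p 2 0)) := by
  induction l with
  | nil => simp [pvGo, pvEvery3]
  | cons p rest ih =>
    obtain ⟨⟨ih01, ih02, ih03⟩, ⟨ih11, ih12, ih13⟩, ⟨ih21, ih22, ih23⟩⟩ := ih
    refine ⟨⟨?_, ?_, ?_⟩, ⟨?_, ?_, ?_⟩, ⟨?_, ?_, ?_⟩⟩ <;>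
      simp [pvGo, hov, pvEvery3_cons, pvDrop1_cons, pvDrop2_cons,
            ih01, ih02, ih03, ih11, ih12, ih13, ih21, ih22, ih23]

lemma pvGo_cycle2 (l : List (List Int)) :
    ((pvGo 1 0 l).1 = (pvEvery2 l).map (fun p => PySem.List.pyGetD p 2 0) ∧ (pvGo 1 0 l).2.1 = [] ∧ (pvGo 1 0 l).2.2.1 = (pvEvery2 (l.drop 1)).map (fun p => PySem.List.pyGetD p 2 0))
    ∧ ((pvGo 1 2 l).2.2.1 = (pvEvery2 l).map (fun p => PySem.List.pyGetD p 2 0) ∧ (pvGo 1 2 l).2.1 = [] ∧ (pvGo 1 2 l).1 = (pvEvery2 (l.drop 1)).map (fun p => PySem.List.pyGetD p 2 0)) := by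
  induction l with
  | nil => simp [pvGo, pvEvery2]
  | cons p rest ih =>
    obtain ⟨⟨ih01, ih02, ih03⟩, ⟨ih21, ih22, ih23⟩⟩ := ih
    refine ⟨⟨?_, ?_, ?_⟩, ⟨?_, ?_, ?_⟩⟩ <;>
      simp [pvGo, pvEvery2_cons, pvDrop1_cons, ih01, ih02, ih03, ih21, ih22, ih23]

-- ===== VERDICT (by name: the statement is the Claim_ definition above) =====
theorem organize_power_list_spec : Claim_equal_organize_power_list := by
  intro power_list override _ _
  unfold Spec_organize_power_list organize_power_list organize_power_list_alt
  rw [foldl_eq_pvGo]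
  by_cases hov : override = 1
  · subst hov
    obtain ⟨⟨h1, h2, h3⟩, _⟩ := pvGo_cycle2 power_list
    simp [h1, h2, h3]
  · obtain ⟨⟨h1, h2, h3⟩, _⟩ := pvGo_cycle3 override hov power_list
    simp [hov, h1, h2, h3]
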